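-- pv_equiv track=rewrite | github.com/MissMaryR/AI-Driven-Pipeline-for-Enzyme-Design-v3 | update_MPNN.py | expand_to_all_chains
-- ===== SOURCE A (Python) =====
-- CHAINS = ('A', 'B', 'C')
--
-- def expand_to_all_chains(chain_a_residues, chains=CHAINS):
--     """
--     Given chain-A insert positions like ['A151', 'A152', ..., 'A162'],
--     return:
--       flat_list        — every position on every chain, A-block then
--                          B-block then C-block, e.g.
--                          ['A151', ..., 'A162', 'B151', ..., 'B162',
--                           'C151', ..., 'C162']
--       symmetry_groups  — list of tuples linking equivalent positions
--                          across chains, e.g.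
--                          [('A151','B151','C151'), ('A152','B152','C152'), ...]
--     """
--     # Strip leading chain letter off each entry so we can re-prefix
--     numeric_positions = [r[1:] for r in chain_a_residues]
--
--     flat_list = []
--     for c in chains:
--         flat_list.extend(f"{c}{num}" for num in numeric_positions)
--
--     symmetry_groups = [
--         tuple(f"{c}{num}" for c in chains) for num in numeric_positions
--     ]
--
--     return flat_list, symmetry_groups
-- ===== SOURCE B (Python) =====
-- CHAINS = ('A', 'B', 'C')
--
-- def expand_to_all_chains(chain_a_residues, chains=CHAINS):
--     # One pass over the residues: each residue's expanded positions are
--     # distributed into per-chain buckets (kept parallel to chains) at the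
--     # same time as its symmetry group is formed; flat_list is the buckets
--     # concatenated, so neither output is rebuilt in a second sweep over
--     # the chain/position grid.
--     buckets = [[] for _ in chains]
--     symmetry_groups = []
--     for r in chain_a_residues:
--         num = r[1:]
--         group = [f"{c}{num}" for c in chains]
--         for bucket, s in zip(buckets, group):
--             bucket.append(s)
--         symmetry_groups.append(tuple(group))
--     flat_list = [s for bucket in buckets for s in bucket]
--     return flat_list, symmetry_groups
-- ===== Notes on version B (the rewrite author's own statement) =====
-- stated objective: alternative
-- what changed: B makes a single pass over the residues, distributing each expanded position into per-chain buckets while forming its symmetry group, and concatenates the buckets at the end, instead of A's two independent sweeps (chain-major loop for flat_list, residue-major comprehension for the groups).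
import Mathlib
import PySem

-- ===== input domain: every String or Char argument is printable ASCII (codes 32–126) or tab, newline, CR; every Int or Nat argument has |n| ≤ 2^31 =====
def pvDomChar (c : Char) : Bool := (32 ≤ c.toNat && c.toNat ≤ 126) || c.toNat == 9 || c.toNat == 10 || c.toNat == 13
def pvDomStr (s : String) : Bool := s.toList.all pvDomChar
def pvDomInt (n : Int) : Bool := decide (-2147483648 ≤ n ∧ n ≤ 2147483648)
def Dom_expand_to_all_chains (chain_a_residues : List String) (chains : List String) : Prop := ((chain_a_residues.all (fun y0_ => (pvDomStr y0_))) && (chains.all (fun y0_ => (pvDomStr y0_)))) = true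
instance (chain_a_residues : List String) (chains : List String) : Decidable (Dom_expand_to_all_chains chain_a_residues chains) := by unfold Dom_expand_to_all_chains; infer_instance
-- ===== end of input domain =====

-- B replaces A's two independent sweeps over the chain/position grid by a single pass over the
-- residues that distributes each expanded position into per-chain buckets while forming its
-- symmetry group; objective: alternative.

-- ===== PORT A =====
def expand_to_all_chains (chain_a_residues : List String) (chains : List String) : List String × List (List String) :=
  -- numeric_positions = [r[1:] for r in chain_a_residues]
  let numeric_positions := chain_a_residues.map (fun r => PySem.Str.slice r (some 1) none)
  -- flat_list = []; for c in chains: flat_list.extend(f"{c}{num}" for num in numeric_positions)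
  let flat_list := chains.foldl (fun acc c => acc ++ numeric_positions.map (fun num => c ++ num)) []
  -- symmetry_groups = [tuple(f"{c}{num}" for c in chains) for num in numeric_positions]
  let symmetry_groups := numeric_positions.map (fun num => chains.map (fun c => c ++ num))
  (flat_list, symmetry_groups)

-- ===== PORT B =====
def expand_to_all_chains_alt (chain_a_residues : List String) (chains : List String) : List String × List (List String) :=
  -- buckets = [[] for _ in chains]; symmetry_groups = []
  -- for r in chain_a_residues:
  --     num = r[1:]
  --     group = [f"{c}{num}" for c in chains]
  --     for bucket, s in zip(buckets, group): bucket.append(s)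
  -- (each in-place append is bucket ++ [s]; the zipped appends are the zipped map below)
  --     symmetry_groups.append(tuple(group))
  let st := chain_a_residues.foldl
    (fun (st : List (List String) × List (List String)) r =>
      let num := PySem.Str.slice r (some 1) none
      let group := chains.map (fun c => c ++ num)
      ((st.1.zip group).map (fun p => p.1 ++ [p.2]), st.2 ++ [group]))
    (chains.map (fun _ => ([] : List String)), [])
  -- flat_list = [s for bucket in buckets for s in bucket]
  (st.1.flatMap (fun bucket => bucket), st.2)

-- ===== PRECONDITION & SPEC =====
def Spec_expand_to_all_chains (chain_a_residues : List String) (chains : List String) (out : List String × List (List String)) : Prop := out = expand_to_all_chains_alt chain_a_residues chains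
instance (chain_a_residues : List String) (chains : List String) (out : List String × List (List String)) : Decidable (Spec_expand_to_all_chains chain_a_residues chains out) := by unfold Spec_expand_to_all_chains; infer_instance

-- ===== CLAIM (what is proved, stated in full; the proofs are below) =====
def Claim_equal_expand_to_all_chains : Prop := ∀ (chain_a_residues : List String) (chains : List String), Dom_expand_to_all_chains chain_a_residues chains → Spec_expand_to_all_chains chain_a_residues chains (expand_to_all_chains chain_a_residues chains)

-- ===== LEMMAS AND PROOFS =====

-- zipWith of a list with itself collapses to a map
theorem pv_zipWith_self {α β : Type} (f : α → α → β) :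
    ∀ (l : List α), List.zipWith f l l = l.map (fun a => f a a) := by
  intro l; induction l with
  | nil => rfl
  | cons a t ih => simp [List.zipWith]

-- fusing two zipWiths over the same right-hand list
theorem pv_zipWith_fuse {α β γ δ : Type} (f : γ → β → δ) (g : α → β → γ) :
    ∀ (B : List α) (C : List β),
      List.zipWith f (List.zipWith g B C) C = List.zipWith (fun b c => f (g b c) c) B C := by
  intro B
  induction B with
  | nil => intro C; rfl
  | cons b bt ih =>
    intro C; cases C with
    | nil => rfl
    | cons c ct => simp [List.zipWith, ih]

-- loop invariant for B's single pass: the buckets hold, per chain, the expanded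
-- positions of the residues consumed so far, and the groups accumulate residue-major.
theorem pv_fold_inv (chains : List String) :
    ∀ (res : List String) (B G : List (List String)), B.length = chains.length →
      res.foldl
        (fun (st : List (List String) × List (List String)) r =>
          let num := PySem.Str.slice r (some 1) none
          let group := chains.map (fun c => c ++ num)
          ((st.1.zip group).map (fun p => p.1 ++ [p.2]), st.2 ++ [group]))
        (B, G)
      = (List.zipWith (fun b c => b ++ res.map (fun r => c ++ PySem.Str.slice r (some 1) none)) B chains,
         G ++ res.map (fun r => chains.map (fun c => c ++ PySem.Str.slice r (some 1) none))) := by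
  intro res
  induction res with
  | nil =>
    intro B G h
    simp only [List.foldl_nil, List.map_nil, List.append_nil]
    refine Prod.ext ?_ rfl
    dsimp only
    -- zipWith of a constant-in-c function over equal-length lists is the identity on B
    induction B generalizing chains with
    | nil => rfl
    | cons b bt ih =>
      cases chains with
      | nil => simp at h
      | cons c ct =>
        simp only [List.length_cons, Nat.add_right_cancel_iff] at h
        rw [List.zipWith_cons_cons, ← ih ct h]
  | cons r rt ih =>
    intro B G h
    simp only [List.foldl_cons]
    rw [List.zip_eq_zipWith, List.map_zipWith, List.zipWith_map_right]
    rw [ih _ _ (by simp [h])]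
    rw [pv_zipWith_fuse]
    simp [List.append_assoc]

-- ===== VERDICT (by name: the statement is the Claim_ definition above) =====
theorem expand_to_all_chains_spec : Claim_equal_expand_to_all_chains := by
  intro res chains _
  unfold Spec_expand_to_all_chains expand_to_all_chains expand_to_all_chains_alt
  dsimp only
  rw [pv_fold_inv chains res _ _ (by simp)]
  refine Prod.ext ?_ ?_
  · dsimp only
    rw [PySem.List.foldl_append_eq_flatMap, List.nil_append, List.zipWith_map_left,
      pv_zipWith_self]
    simp [List.flatMap_def, List.map_map, Function.comp_def]
  · simp [List.map_map]
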